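-- pv_equiv track=rewrite | github.com/naveengoyal2493/python-programs | test_programs/test56.py | cards_game
-- ===== SOURCE A (Python) =====
-- def cards_game(input):
--     highest = []
--
--     for list1 in input:
--         already = {}
--         numbers = []
--         for i in list1:
--             if i in already:
--                 already[i] += 1
--             else:
--                 already[i] = 1
--
--         for key in already.keys():
--             if already[key] == 1:
--                 numbers.append(key)
--
--         if not numbers:
--             numbers.append(0)
--
--         highest.append(max(numbers))
--
--     return -1 if max(highest) == 0 else max(highest)
-- ===== SOURCE B (Python) =====
-- def _top_singleton(sub):
--     # Sort, then scan runs of equal values: a run of length 1 is a singleton.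
--     # Ascending order means the last singleton seen is the largest; 0 stands
--     # for "no singleton" (matching the task's sentinel).
--     s = sorted(sub)
--     top = 0
--     i = 0
--     n = len(s)
--     while i < n:
--         j = i + 1
--         while j < n and s[j] == s[i]:
--             j += 1
--         if j - i == 1:
--             top = s[i]
--         i = j
--     return top
--
--
-- def cards_game(input):
--     best = max(_top_singleton(sub) for sub in input)
--     return -1 if best == 0 else best
-- ===== Notes on version B (the rewrite author's own statement) =====
-- stated objective: alternative
-- what changed: Replaces hash-map frequency counting plus a per-sublist 'highest' list with sort-then-scan: each sublist is sorted and scanned for runs of equal values, a length-1 run being a singleton (the last one seen is the max), and one overall max over these per-sublist tops replaces the max of the collected list.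
import Mathlib
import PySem

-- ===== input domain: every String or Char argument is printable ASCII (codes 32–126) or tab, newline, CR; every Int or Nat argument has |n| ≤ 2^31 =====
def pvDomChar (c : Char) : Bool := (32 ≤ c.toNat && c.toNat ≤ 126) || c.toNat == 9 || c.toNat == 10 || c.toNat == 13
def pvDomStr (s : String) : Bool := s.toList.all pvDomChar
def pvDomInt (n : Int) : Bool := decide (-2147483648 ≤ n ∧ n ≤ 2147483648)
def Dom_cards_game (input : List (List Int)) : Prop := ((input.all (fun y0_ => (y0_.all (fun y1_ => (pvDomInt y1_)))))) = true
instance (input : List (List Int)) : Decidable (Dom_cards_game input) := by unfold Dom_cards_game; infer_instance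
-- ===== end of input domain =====

-- B sorts each sublist and scans runs of equal values (a length-1 run is a singleton; the last one seen is the max),
-- taking one overall max of the per-sublist tops, instead of A's dict counting with a collected 'highest' list (alternative algorithm).


-- ===== PORT A =====
-- A-side helpers: the named steps of A's loop body (same values A's code builds)
-- 'already' after the first inner loop
def pvCount (list1 : List Int) : PySem.Dict Int Int :=
  list1.foldl (fun d i =>
    if d.contains i then d.insert i (d.getD i 0 + 1) else d.insert i 1)
    PySem.Dict.empty

-- 'numbers' after the second inner loop
def pvNumbers (list1 : List Int) : List Int :=
  (pvCount list1).keys.foldl (fun ns key =>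
    if (pvCount list1).getD key 0 == 1 then ns ++ [key] else ns) []

-- one iteration of A's outer loop: append 0 if 'numbers' is empty, then append its max to 'highest'
def pvAstep (highest : List Int) (list1 : List Int) : List Int :=
  match PySem.List.max?
      (if (pvNumbers list1).isEmpty then pvNumbers list1 ++ [0] else pvNumbers list1)
      (fun y => y) with
  | some m => highest ++ [m]
  | none => highest             -- unreachable: the list is never empty

def cards_game (input : List (List Int)) : Int :=
  let highest := input.foldl pvAstep []
  match PySem.List.max? highest (fun y => y) with
  | some m => if m == 0 then -1 else m
  | none => 0                   -- unreachable under Pre_ (Python raises ValueError on empty input)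

-- ===== PORT B =====
-- B's run scan over the sorted sublist: the inner 'while s[j] == s[i]' skips the run of values
-- equal to the head (takeWhile/dropWhile); a run of length 1 overwrites 'top'.
-- The fuel (initially the list's length, which the index loop never exceeds) only makes the recursion structural.
def pvScanF : Nat → List Int → Int → Int
  | 0, _, top => top
  | _ + 1, [], top => top
  | n + 1, x :: t, top =>
    if (t.takeWhile (fun y => y == x)).isEmpty then
      pvScanF n (t.dropWhile (fun y => y == x)) x
    else
      pvScanF n (t.dropWhile (fun y => y == x)) top

-- B's _top_singleton
def pvTop (sub : List Int) : Int :=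
  pvScanF (PySem.List.sorted sub (fun y => y) false).length
    (PySem.List.sorted sub (fun y => y) false) 0

def cards_game_alt (input : List (List Int)) : Int :=
  match PySem.List.max? (input.map pvTop) (fun y => y) with
  | some best => if best == 0 then -1 else best
  | none => 0                   -- unreachable under Pre_ (Python raises ValueError on empty input)

-- ===== PRECONDITION & SPEC =====
-- Pre_ excludes only the empty outer list, on which Python A raises ValueError (max() of an empty sequence).
def Pre_cards_game (input : List (List Int)) : Prop := input ≠ []
instance (input : List (List Int)) : Decidable (Pre_cards_game input) := by unfold Pre_cards_game; infer_instance
def pvWitness_cards_game : List (List Int) := [[1, 2, 2], [3]]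

def Spec_cards_game (input : List (List Int)) (out : Int) : Prop := out = cards_game_alt input
instance (input : List (List Int)) (out : Int) : Decidable (Spec_cards_game input out) := by unfold Spec_cards_game; infer_instance

-- ===== CLAIM (what is proved, stated in full; the proofs are below) =====
def Claim_equal_cards_game : Prop := ∀ (input : List (List Int)), Dom_cards_game input → Pre_cards_game input → Spec_cards_game input (cards_game input)

-- ===== LEMMAS AND PROOFS =====

def pvMax? (xs : List Int) : Option Int := PySem.List.max? xs (fun y => y)

-- A's per-sublist singleton list (= 'numbers')
def pvS (sub : List Int) : List Int :=
  (PySem.Set.ofList sub).filter (fun x => PySem.List.count sub x == 1)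

-- A's per-sublist contribution to 'highest'
def pvM (sub : List Int) : Int :=
  match pvMax? (pvS sub) with
  | some m => m
  | none => 0

-- the singletons of a list, in its own order (each occurs exactly once in the result)
def pvSingles (s : List Int) : List Int :=
  s.filter (fun z => s.count z == 1)

def pvOMax (a b : Option Int) : Option Int :=
  match a, b with
  | none, b => b
  | some x, none => some x
  | some x, some y => some (max x y)

lemma pvOMax_none_right (a : Option Int) : pvOMax a none = a := by
  cases a <;> rfl

lemma pvMax?_append (xs ys : List Int) : pvMax? (xs ++ ys) = pvOMax (pvMax? xs) (pvMax? ys) := by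
  cases xs with
  | nil =>
    rw [List.nil_append, show pvMax? [] = none from rfl]
    cases pvMax? ys <;> rfl
  | cons x t =>
    cases ys with
    | nil =>
      rw [List.append_nil, show pvMax? [] = none from rfl, pvOMax_none_right]
    | cons y u =>
      simp only [pvMax?, List.cons_append, PySem.List.max?_id_cons, pvOMax,
        List.foldl_append, List.foldl_cons]
      congr 1
      rw [← List.foldl_assoc (op := max)]

-- A's counting dict is collections.Counter
lemma pvCount_eq_counter (sub : List Int) : pvCount sub = PySem.Dict.counter sub := by
  unfold pvCount
  rw [PySem.Dict.counter_eq_foldl]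
  congr 1
  funext d i
  by_cases h : d.contains i
  · simp [PySem.Dict.modify, h]
  · have hget : d.get? i = none :=
      (PySem.Dict.get?_eq_none_iff_contains d i).mpr (by simp [h])
    simp [PySem.Dict.modify, PySem.Dict.getD, h, hget]

-- A's 'numbers' list equals pvS
lemma pvNumbers_eq (sub : List Int) : pvNumbers sub = pvS sub := by
  unfold pvNumbers
  simp only [pvCount_eq_counter]
  have h := PySem.List.foldl_append_if
    (p := fun key => (PySem.Dict.counter sub).getD key 0 == 1) (f := fun x => x)
    ((PySem.Dict.counter sub).keys) []
  simp only [List.nil_append, List.map_id_fun', id] at h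
  rw [h, PySem.Dict.keys_counter, pvS]
  apply List.filter_congr
  intro x _
  rw [PySem.Dict.getD_counter, PySem.List.count_eq]
  by_cases hc : List.count x sub = 1
  · simp [hc]
  · have hc' : ((List.count x sub : Int)) ≠ 1 := by exact_mod_cast hc
    simp [beq_eq_decide, hc, hc']

lemma pvAstep_eq : pvAstep = fun h sub => h ++ [pvM sub] := by
  funext h sub
  unfold pvAstep
  rw [pvNumbers_eq]
  unfold pvM
  by_cases hs : (pvS sub).isEmpty
  · rw [if_pos hs, List.isEmpty_iff.mp hs]
    rfl
  · rw [if_neg hs]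
    rcases he : pvS sub with _ | ⟨a, t⟩
    · exact absurd (List.isEmpty_iff.mpr he ▸ rfl) hs
    · show _ = h ++ [match pvMax? (a :: t) with | some m => m | none => 0]
      simp [pvMax?, PySem.List.max?_id_cons]

-- a max over any list with the same members (as Ints) is the same
lemma pvMax?_eq_of_mem_iff (xs ys : List Int) (h : ∀ z, z ∈ xs ↔ z ∈ ys) :
    pvMax? xs = pvMax? ys := by
  rcases hx : pvMax? xs with _ | m1 <;> rcases hy : pvMax? ys with _ | m2
  · rfl
  · have hxs : xs = [] := (PySem.List.max?_eq_none_iff xs (fun y => y)).mp hx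
    have hm : m2 ∈ xs := (h m2).mpr (PySem.List.max?_mem hy)
    rw [hxs] at hm; cases hm
  · have hys : ys = [] := (PySem.List.max?_eq_none_iff ys (fun y => y)).mp hy
    have hm : m1 ∈ ys := (h m1).mp (PySem.List.max?_mem hx)
    rw [hys] at hm; cases hm
  · have h1 : m1 ∈ ys := (h m1).mp (PySem.List.max?_mem hx)
    have h2 : m2 ∈ xs := (h m2).mpr (PySem.List.max?_mem hy)
    have le1 : m1 ≤ m2 := PySem.List.max?_isMax hy m1 h1
    have le2 : m2 ≤ m1 := PySem.List.max?_isMax hx m2 h2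
    exact congrArg some (le_antisymm le1 le2)

-- in a sorted list x :: t, everything surviving the run of x's is strictly above x
lemma pvLt_dropWhile (x : Int) : ∀ (t : List Int), (x :: t).Pairwise (· ≤ ·) →
    ∀ y ∈ t.dropWhile (fun y => y == x), x < y := by
  intro t
  induction t with
  | nil => intro _ y hy; cases hy
  | cons a t' ih =>
    intro hs y hy
    rcases List.pairwise_cons.mp hs with ⟨hx, ht⟩
    by_cases ha : (a == x) = true
    · rw [List.dropWhile_cons, if_pos ha] at hy
      exact ih (List.pairwise_cons.mpr
        ⟨fun z hz => hx z (List.mem_cons_of_mem _ hz), (List.pairwise_cons.mp ht).2⟩) y hy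
    · rw [List.dropWhile_cons, if_neg ha] at hy
      have hxa : x < a :=
        lt_of_le_of_ne (hx a (List.mem_cons_self)) (fun h => ha (by simp [h]))
      rcases List.mem_cons.mp hy with rfl | hy'
      · exact hxa
      · exact lt_of_lt_of_le hxa ((List.pairwise_cons.mp ht).1 y hy')

-- splitting the singleton list of a sorted list at the head's run
lemma pvSingles_cons (x : Int) (t : List Int) (hs : (x :: t).Pairwise (· ≤ ·)) :
    pvSingles (x :: t) = (if (t.takeWhile (fun y => y == x)).isEmpty then [x] else [])
      ++ pvSingles (t.dropWhile (fun y => y == x)) := by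
  have htw : ∀ y ∈ t.takeWhile (fun y => y == x), y = x := by
    intro y hy
    have := List.mem_takeWhile_imp hy
    simpa using this
  have hlt : ∀ y ∈ t.dropWhile (fun y => y == x), x < y := pvLt_dropWhile x t hs
  have hsplit : t = t.takeWhile (fun y => y == x) ++ t.dropWhile (fun y => y == x) :=
    (List.takeWhile_append_dropWhile).symm
  have hcx : (x :: t).count x = 1 + (t.takeWhile (fun y => y == x)).length := by
    rw [List.count_cons_self]
    conv_lhs => rw [hsplit]
    rw [List.count_append]
    have h1 : (t.takeWhile (fun y => y == x)).count x
        = (t.takeWhile (fun y => y == x)).length :=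
      List.count_eq_length.mpr (fun b hb => (htw b hb).symm)
    have h2 : (t.dropWhile (fun y => y == x)).count x = 0 :=
      List.count_eq_zero.mpr (fun h => lt_irrefl x (hlt x h))
    omega
  have hcy : ∀ y ∈ t.dropWhile (fun y => y == x),
      (x :: t).count y = (t.dropWhile (fun y => y == x)).count y := by
    intro y hy
    have hyx : y ≠ x := fun h => lt_irrefl x (h ▸ hlt y hy)
    rw [List.count_cons_of_ne hyx.symm]
    conv_lhs => rw [hsplit]
    rw [List.count_append]
    have h1 : (t.takeWhile (fun y => y == x)).count y = 0 :=
      List.count_eq_zero.mpr (fun h => hyx (htw y h))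
    omega
  unfold pvSingles
  have hstep : List.filter (fun z => (x :: t).count z == 1) (x :: t)
      = List.filter (fun z => (x :: t).count z == 1)
          (x :: (t.takeWhile (fun y => y == x) ++ t.dropWhile (fun y => y == x))) := by
    rw [← hsplit]
  rw [hstep, List.filter_cons, List.filter_append]
  have htwf : (t.takeWhile (fun y => y == x)).filter
      (fun z => (x :: t).count z == 1) = [] := by
    rw [List.filter_eq_nil_iff]
    intro b hb
    rw [htw b hb, hcx]
    have hpos : 0 < (t.takeWhile (fun y => y == x)).length := List.length_pos_of_mem hb
    simp only [beq_iff_eq]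
    omega
  have htdf : (t.dropWhile (fun y => y == x)).filter (fun z => (x :: t).count z == 1)
      = (t.dropWhile (fun y => y == x)).filter
          (fun z => (t.dropWhile (fun y => y == x)).count z == 1) :=
    List.filter_congr (fun y hy => by rw [hcy y hy])
  rw [htwf, htdf]
  by_cases he : (t.takeWhile (fun y => y == x)).isEmpty
  · have : ((x :: t).count x == 1) = true := by
      rw [hcx, List.isEmpty_iff.mp he]
      rfl
    rw [if_pos this, if_pos he]
    rfl
  · have hlen : (t.takeWhile (fun y => y == x)).length ≠ 0 := by
      intro h
      exact he (List.isEmpty_iff.mpr (List.length_eq_zero_iff.mp h))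
    have : ((x :: t).count x == 1) = false := by
      rw [hcx]
      simp only [beq_eq_false_iff_ne, ne_eq]
      omega
    rw [if_neg (by rw [this]; exact Bool.false_ne_true), if_neg he]

-- characterisation of B's run scan on a sorted list: the last (= greatest) singleton, else 'top'
lemma pvScanF_char : ∀ (n : Nat) (s : List Int), s.length ≤ n → s.Pairwise (· ≤ ·) → ∀ top,
    pvScanF n s top = match pvMax? (pvSingles s) with | some m => m | none => top := by
  intro n
  induction n with
  | zero =>
    intro s hlen _ top
    rcases List.length_eq_zero_iff.mp (Nat.le_zero.mp hlen) with rfl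
    rfl
  | succ n ih =>
    intro s hlen hsort top
    rcases s with _ | ⟨x, t⟩
    · rfl
    · have htd : (t.dropWhile (fun y => y == x)).length ≤ n := by
        have h1 := (List.dropWhile_sublist (l := t) (p := fun y => y == x)).length_le
        simp only [List.length_cons] at hlen
        omega
      have hsort_td : (t.dropWhile (fun y => y == x)).Pairwise (· ≤ ·) :=
        List.Pairwise.sublist (List.dropWhile_sublist _) ((List.pairwise_cons.mp hsort).2)
      rw [pvSingles_cons x t hsort]
      show (if (t.takeWhile (fun y => y == x)).isEmpty then
          pvScanF n (t.dropWhile (fun y => y == x)) x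
        else pvScanF n (t.dropWhile (fun y => y == x)) top) = _
      by_cases he : (t.takeWhile (fun y => y == x)).isEmpty
      · rw [if_pos he, if_pos he, ih _ htd hsort_td x]
        rw [show ([x] ++ pvSingles (t.dropWhile (fun y => y == x)))
            = x :: pvSingles (t.dropWhile (fun y => y == x)) from rfl]
        rcases hm : pvMax? (pvSingles (t.dropWhile (fun y => y == x))) with _ | m
        · rw [(PySem.List.max?_eq_none_iff _ _).mp hm]
          rfl
        · have hmem : m ∈ pvSingles (t.dropWhile (fun y => y == x)) := PySem.List.max?_mem hm
          have hmtd : m ∈ t.dropWhile (fun y => y == x) := List.mem_of_mem_filter hmem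
          have hxm : x ≤ m := le_of_lt (pvLt_dropWhile x t hsort m hmtd)
          have : pvMax? (x :: pvSingles (t.dropWhile (fun y => y == x))) = some m := by
            have := pvMax?_append [x] (pvSingles (t.dropWhile (fun y => y == x)))
            rw [List.singleton_append, hm] at this
            rw [this]
            show some (max x m) = some m
            rw [max_eq_right hxm]
          rw [this]
      · rw [if_neg he, if_neg he, List.nil_append]
        exact ih _ htd hsort_td top

-- B's per-sublist top equals A's per-sublist max
lemma pvTop_eq_pvM (sub : List Int) : pvTop sub = pvM sub := by
  unfold pvTop pvM
  rw [pvScanF_char _ _ le_rfl (PySem.List.sorted_pairwise sub (fun y => y))]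
  have hmem : ∀ z, z ∈ pvSingles (PySem.List.sorted sub (fun y => y) false) ↔ z ∈ pvS sub := by
    intro z
    unfold pvSingles pvS
    rw [List.mem_filter, List.mem_filter]
    constructor
    · rintro ⟨hz, hc⟩
      refine ⟨(PySem.Set.mem_ofList sub z).mpr ((PySem.List.mem_sorted _ _ _ _).mp hz), ?_⟩
      rw [PySem.List.count_eq]
      rw [(PySem.List.sorted_perm sub (fun y => y) false).count_eq] at hc
      simp only [beq_iff_eq] at hc ⊢
      exact_mod_cast hc
    · rintro ⟨hz, hc⟩
      refine ⟨(PySem.List.mem_sorted _ _ _ _).mpr ((PySem.Set.mem_ofList sub z).mp hz), ?_⟩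
      rw [PySem.List.count_eq] at hc
      rw [(PySem.List.sorted_perm sub (fun y => y) false).count_eq]
      simp only [beq_iff_eq] at hc ⊢
      exact_mod_cast hc
  rw [pvMax?_eq_of_mem_iff _ _ hmem]

-- ===== VERDICT (by name: the statement is the Claim_ definition above) =====
theorem cards_game_spec : Claim_equal_cards_game := by
  intro input _hdom _hpre
  show cards_game input = cards_game_alt input
  show (match PySem.List.max? (input.foldl pvAstep []) (fun y => y) with
        | some m => if m == 0 then -1 else m
        | none => (0 : Int)) =
       (match PySem.List.max? (input.map pvTop) (fun y => y) with
        | some best => if best == 0 then -1 else best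
        | none => (0 : Int))
  rw [pvAstep_eq, PySem.List.foldl_append_singleton_eq_map, List.nil_append]
  have : input.map pvM = input.map pvTop := by
    simp [pvTop_eq_pvM]
  rw [this]
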